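-- pv_equiv track=rewrite | github.com/Hannaaaaaaa/2017A2CS | Ch25:/recursion2.py | helper2
-- ===== SOURCE A (Python) =====
-- def helper2(x,y,s5,s3):
--     if x==len(y):
--         return (s3==s5)
--     if y[x]%5==0:
--         return helper2(x+1,y,s5+y[x],s3)
--     else:
--         if y[x]%3==0:
--             return helper2(x+1,y,s5,s3+y[x])
--         else:
--             return helper2(x+1,y,s5+y[x],s3) or helper2(x+1,y,s5,s3+y[x])
-- ===== SOURCE B (Python) =====
-- def helper2(x, y, s5, s3):
--     # Subset-sum DP: track the set of reachable values of s3 - s5 over y[x:].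
--     diffs = {s3 - s5}
--     for i in range(x, len(y)):
--         v = y[i]
--         if v % 5 == 0:
--             diffs = {d - v for d in diffs}
--         elif v % 3 == 0:
--             diffs = {d + v for d in diffs}
--         else:
--             diffs = {d - v for d in diffs} | {d + v for d in diffs}
--     return 0 in diffs
-- ===== Notes on version B (the rewrite author's own statement) =====
-- stated objective: alternative
-- what changed: Replaced A's branching recursion (trying both placements of each free element independently) by a single left-to-right pass maintaining the set of reachable differences s3-s5 (subset-sum DP); dedup collapses equal differences but on random distinct values the cost is comparable.
import Mathlib
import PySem

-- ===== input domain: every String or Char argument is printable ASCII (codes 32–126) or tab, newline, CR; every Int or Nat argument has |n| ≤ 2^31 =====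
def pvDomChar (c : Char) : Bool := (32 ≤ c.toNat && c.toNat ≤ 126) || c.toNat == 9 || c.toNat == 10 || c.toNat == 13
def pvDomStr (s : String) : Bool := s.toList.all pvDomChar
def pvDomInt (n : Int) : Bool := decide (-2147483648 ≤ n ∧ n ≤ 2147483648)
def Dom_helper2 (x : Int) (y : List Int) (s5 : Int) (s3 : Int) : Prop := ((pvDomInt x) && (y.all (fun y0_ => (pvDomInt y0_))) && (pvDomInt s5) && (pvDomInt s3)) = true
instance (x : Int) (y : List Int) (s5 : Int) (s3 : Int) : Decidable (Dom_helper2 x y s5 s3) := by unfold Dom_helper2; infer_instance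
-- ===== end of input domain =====

-- B replaces A's exponential two-way recursion by one pass over y[x:] keeping the set of
-- reachable differences s3-s5 (subset-sum DP); equivalence is about return values only.

-- ===== PORT A =====
def helper2 (x : Int) (y : List Int) (s5 : Int) (s3 : Int) : Bool :=
  if x = (y.length : Int) then s3 == s5
  else
    match h : PySem.List.pyGet? y x with
    | none => false   -- IndexError (excluded by Pre_helper2)
    | some v =>
      if PySem.Int.mod v 5 == 0 then helper2 (x + 1) y (s5 + v) s3
      else if PySem.Int.mod v 3 == 0 then helper2 (x + 1) y s5 (s3 + v)
      else helper2 (x + 1) y (s5 + v) s3 || helper2 (x + 1) y s5 (s3 + v)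
termination_by ((y.length : Int) - x).toNat
decreasing_by
  all_goals
    have hin : PySem.Raise.InRange y.length x := by
      by_contra hc
      rw [(PySem.List.pyGet?_eq_none_iff y x).mpr hc] at h
      simp at h
    unfold PySem.Raise.InRange at hin
    omega

-- ===== PORT B =====
def helper2_altStep (diffs : PySem.Set Int) (v : Int) : PySem.Set Int :=
  if PySem.Int.mod v 5 == 0 then PySem.Set.ofList (diffs.map (fun d => d - v))
  else if PySem.Int.mod v 3 == 0 then PySem.Set.ofList (diffs.map (fun d => d + v))
  else PySem.Set.union (PySem.Set.ofList (diffs.map (fun d => d - v)))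
                       (PySem.Set.ofList (diffs.map (fun d => d + v)))

def helper2_alt (x : Int) (y : List Int) (s5 : Int) (s3 : Int) : Bool :=
  let init : PySem.Set Int := PySem.Set.ofList [s3 - s5]
  let diffs := (PySem.List.pyRange x (y.length : Int) 1).foldl
    (fun S i => helper2_altStep S (PySem.List.pyGetD y i 0)) init
  PySem.Set.contains diffs 0

-- ===== PRECONDITION & SPEC =====
-- Pre_ excludes exactly the inputs on which A raises IndexError: x > len(y)
-- (A indexes y[x] before the loop can stop) and x < -len(y) (negative index out of range).
def Pre_helper2 (x : Int) (y : List Int) (s5 : Int) (s3 : Int) : Prop :=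
  -(y.length : Int) ≤ x ∧ x ≤ (y.length : Int)
instance (x : Int) (y : List Int) (s5 : Int) (s3 : Int) : Decidable (Pre_helper2 x y s5 s3) := by
  unfold Pre_helper2; infer_instance

def pvWitness_helper2 : Int × List Int × Int × Int := (-2, [5, 3, 1], 0, 0)

def Spec_helper2 (x : Int) (y : List Int) (s5 : Int) (s3 : Int) (out : Bool) : Prop := out = helper2_alt x y s5 s3
instance (x : Int) (y : List Int) (s5 : Int) (s3 : Int) (out : Bool) : Decidable (Spec_helper2 x y s5 s3 out) := by unfold Spec_helper2; infer_instance

-- ===== CLAIM (what is proved, stated in full; the proofs are below) =====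
def Claim_equal_helper2 : Prop := ∀ (x : Int) (y : List Int) (s5 : Int) (s3 : Int), Dom_helper2 x y s5 s3 → Pre_helper2 x y s5 s3 → Spec_helper2 x y s5 s3 (helper2 x y s5 s3)
-- ===== LEMMAS AND PROOFS =====

-- A's recursion restated structurally on the remaining suffix.
def reachA : List Int → Int → Int → Bool
  | [], s5, s3 => s3 == s5
  | v :: t, s5, s3 =>
    if PySem.Int.mod v 5 == 0 then reachA t (s5 + v) s3
    else if PySem.Int.mod v 3 == 0 then reachA t s5 (s3 + v)
    else reachA t (s5 + v) s3 || reachA t s5 (s3 + v)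

-- The same recursion on the single difference d = s3 - s5.
def reachD : List Int → Int → Bool
  | [], d => d == 0
  | v :: t, d =>
    if PySem.Int.mod v 5 == 0 then reachD t (d - v)
    else if PySem.Int.mod v 3 == 0 then reachD t (d + v)
    else reachD t (d - v) || reachD t (d + v)

theorem reachA_eq_reachD (l : List Int) (s5 s3 : Int) :
    reachA l s5 s3 = reachD l (s3 - s5) := by
  induction l generalizing s5 s3 with
  | nil =>
    simp only [reachA, reachD]
    by_cases h : s3 = s5
    · simp [h]
    · have h' : s3 - s5 ≠ 0 := by omega
      simp [h, h']
  | cons v t ih =>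
    simp only [reachA, reachD]
    split_ifs
    · rw [ih]; ring_nf
    · rw [ih]; ring_nf
    · rw [ih, ih]; ring_nf

theorem pyGet?_eq_some_pyGetD (y : List Int) (i : Int)
    (h : PySem.Raise.InRange y.length i) :
    PySem.List.pyGet? y i = some (PySem.List.pyGetD y i 0) := by
  cases hg : PySem.List.pyGet? y i with
  | none => exact absurd ((PySem.List.pyGet?_eq_none_iff y i).mp hg) (by simp [h])
  | some w => simp [PySem.List.pyGetD, hg]

theorem helper2_eq_reachA (y : List Int) (x : Int) (s5 s3 : Int)
    (h0 : -(y.length : Int) ≤ x) (hn : x ≤ (y.length : Int)) :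
    helper2 x y s5 s3 =
      reachA ((PySem.List.pyRange x (y.length : Int) 1).map
        (fun i => PySem.List.pyGetD y i 0)) s5 s3 := by
  by_cases hx : x = (y.length : Int)
  · subst hx
    rw [helper2]
    simp [reachA, PySem.List.pyRange]
  · have hlt : x < (y.length : Int) := lt_of_le_of_ne hn hx
    have hin : PySem.Raise.InRange y.length x := by
      unfold PySem.Raise.InRange; omega
    have hget := pyGet?_eq_some_pyGetD y x hin
    have ih : ∀ s5' s3' : Int, helper2 (x + 1) y s5' s3' =
        reachA ((PySem.List.pyRange (x + 1) (y.length : Int) 1).map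
          (fun i => PySem.List.pyGetD y i 0)) s5' s3' :=
      fun s5' s3' => helper2_eq_reachA y (x + 1) s5' s3' (by omega) (by omega)
    rw [helper2, if_neg hx, PySem.List.pyRange_one_cons hlt, List.map_cons]
    split
    next h => rw [hget] at h; simp at h
    next v h =>
      rw [hget] at h
      injection h with hv
      rw [hv]
      simp only [reachA]
      split_ifs <;> simp only [ih]
termination_by ((y.length : Int) - x).toNat
decreasing_by omega

theorem mem_step (S : PySem.Set Int) (v m : Int) :
    m ∈ helper2_altStep S v ↔
      (if PySem.Int.mod v 5 == 0 then ∃ d ∈ S, m = d - v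
       else if PySem.Int.mod v 3 == 0 then ∃ d ∈ S, m = d + v
       else (∃ d ∈ S, m = d - v) ∨ ∃ d ∈ S, m = d + v) := by
  unfold helper2_altStep
  split_ifs <;>
    simp [PySem.Set.mem_ofList, PySem.Set.mem_union, List.mem_map, eq_comm]

theorem mem_foldl_step (l : List Int) (S : PySem.Set Int) :
    (0 : Int) ∈ l.foldl helper2_altStep S ↔ ∃ d ∈ S, reachD l d = true := by
  induction l generalizing S with
  | nil =>
    simp only [List.foldl_nil]
    constructor
    · intro h; exact ⟨0, h, by simp [reachD]⟩
    · rintro ⟨d, hd, hr⟩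
      simp only [reachD, beq_iff_eq] at hr
      subst hr; exact hd
  | cons v t ih =>
    simp only [List.foldl_cons, ih]
    constructor
    · rintro ⟨m, hm, hr⟩
      rw [mem_step] at hm
      by_cases h5 : (PySem.Int.mod v 5 == 0) = true
      · rw [if_pos h5] at hm
        obtain ⟨d, hd, rfl⟩ := hm
        exact ⟨d, hd, by simp only [reachD]; rw [if_pos h5]; exact hr⟩
      · rw [if_neg h5] at hm
        by_cases h3 : (PySem.Int.mod v 3 == 0) = true
        · rw [if_pos h3] at hm
          obtain ⟨d, hd, rfl⟩ := hm
          exact ⟨d, hd, by simp only [reachD]; rw [if_neg h5, if_pos h3]; exact hr⟩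
        · rw [if_neg h3] at hm
          rcases hm with ⟨d, hd, rfl⟩ | ⟨d, hd, rfl⟩ <;>
            exact ⟨d, hd, by simp only [reachD]; rw [if_neg h5, if_neg h3]; simp [hr]⟩
    · rintro ⟨d, hd, hr⟩
      simp only [reachD] at hr
      by_cases h5 : (PySem.Int.mod v 5 == 0) = true
      · rw [if_pos h5] at hr
        exact ⟨d - v, (mem_step _ _ _).mpr (by rw [if_pos h5]; exact ⟨d, hd, rfl⟩), hr⟩
      · rw [if_neg h5] at hr
        by_cases h3 : (PySem.Int.mod v 3 == 0) = true
        · rw [if_pos h3] at hr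
          exact ⟨d + v, (mem_step _ _ _).mpr
            (by rw [if_neg h5, if_pos h3]; exact ⟨d, hd, rfl⟩), hr⟩
        · rw [if_neg h3] at hr
          rcases Bool.or_eq_true_iff.mp hr with hr | hr
          · exact ⟨d - v, (mem_step _ _ _).mpr
              (by rw [if_neg h5, if_neg h3]; exact Or.inl ⟨d, hd, rfl⟩), hr⟩
          · exact ⟨d + v, (mem_step _ _ _).mpr
              (by rw [if_neg h5, if_neg h3]; exact Or.inr ⟨d, hd, rfl⟩), hr⟩

theorem helper2_alt_eq_reachD (y : List Int) (x : Int) (s5 s3 : Int) :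
    helper2_alt x y s5 s3 =
      reachD ((PySem.List.pyRange x (y.length : Int) 1).map
        (fun i => PySem.List.pyGetD y i 0)) (s3 - s5) := by
  unfold helper2_alt
  dsimp only
  rw [← List.foldl_map]
  set l := (PySem.List.pyRange x (y.length : Int) 1).map (fun i => PySem.List.pyGetD y i 0)
  have hiff : PySem.Set.contains (l.foldl helper2_altStep (PySem.Set.ofList [s3 - s5])) 0 = true
      ↔ reachD l (s3 - s5) = true := by
    rw [PySem.Set.contains_iff, mem_foldl_step]
    constructor
    · rintro ⟨d, hd, hr⟩
      rw [PySem.Set.mem_ofList, List.mem_singleton] at hd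
      subst hd; exact hr
    · intro hr
      exact ⟨s3 - s5, by rw [PySem.Set.mem_ofList]; simp, hr⟩
  exact Bool.eq_iff_iff.mpr hiff

-- ===== VERDICT (by name: the statement is the Claim_ definition above) =====
theorem helper2_spec : Claim_equal_helper2 := by
  intro x y s5 s3 _ hpre
  obtain ⟨h0, hn⟩ := hpre
  unfold Spec_helper2
  rw [helper2_eq_reachA y x s5 s3 h0 hn, helper2_alt_eq_reachD y x s5 s3,
    reachA_eq_reachD]
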